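-- pv_equiv track=rewrite | github.com/wqxxzd/CMPUT291-Project-2 | Phase3.py | presimplified
-- ===== SOURCE A (Python) =====
-- def presimplified(word):
--     #This function can ONLY delete the space BEFORE the sign
--     ind = 0
--     symblist1 = ['>', '<', '=', ' ']
--     newkey = ''
--     for ch in word:
--         if (word[ind] == ' '):
--             if ((ind+1) == len(word)):
--                 return newkey[:ind]
--             elif (word[ind+1] not in symblist1):
--                 newkey = newkey + ch
--         else:
--             newkey = newkey + ch
--         ind = ind + 1
--     return newkey
-- ===== SOURCE B (Python) =====
-- def presimplified(word):
--     # Single reversed pass: a space is dropped when the following kept text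
--     # starts with '<', '>', '=', ' ' or is empty (end of string).
--     out = []
--     for ch in reversed(word):
--         if ch == ' ' and (not out or out[-1] in '<>= '):
--             continue
--         out.append(ch)
--     return ''.join(reversed(out))
-- ===== Notes on version B (the rewrite author's own statement) =====
-- stated objective: alternative
-- what changed: Replaces the index-tracking forward loop with lookahead word[ind+1] and its early-return slice by a single reversed-order pass that decides each space from the head of the already-built suffix, then reverses once.
import Mathlib
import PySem

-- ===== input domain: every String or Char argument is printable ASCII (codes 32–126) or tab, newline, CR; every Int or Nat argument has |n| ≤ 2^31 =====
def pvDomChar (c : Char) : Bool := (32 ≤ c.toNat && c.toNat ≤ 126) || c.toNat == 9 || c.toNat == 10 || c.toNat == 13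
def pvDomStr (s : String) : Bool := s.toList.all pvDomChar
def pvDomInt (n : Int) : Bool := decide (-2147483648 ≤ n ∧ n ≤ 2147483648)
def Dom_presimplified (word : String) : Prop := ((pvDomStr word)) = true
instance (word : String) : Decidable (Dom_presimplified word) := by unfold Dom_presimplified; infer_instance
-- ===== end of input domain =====

-- B replaces the forward index-and-lookahead loop by one reversed pass deciding each
-- space from the head of the already-built suffix (objective: alternative).

-- ===== PORT A =====
def symblist1 : List Char := ['>', '<', '=', ' ']

-- the 'for ch in word' loop of A: chs is the remaining iteration, ind and newkey the loop state
def presimplifiedA (word : List Char) (chs : List Char) (ind : Int) (newkey : List Char) :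
    List Char :=
  match chs with
  | [] => newkey
  | ch :: rest =>
    if PySem.List.pyGet? word ind = some ' ' then
      if ind + 1 = word.length then
        PySem.List.slice newkey (some 0) (some ind)      -- return newkey[:ind]
      else
        match PySem.List.pyGet? word (ind + 1) with
        | some c =>
          if c ∉ symblist1 then presimplifiedA word rest (ind + 1) (newkey ++ [ch])
          else presimplifiedA word rest (ind + 1) newkey
        | none => presimplifiedA word rest (ind + 1) newkey   -- unreachable: ind+1 < len here
    else
      presimplifiedA word rest (ind + 1) (newkey ++ [ch])

def presimplified (word : String) : String :=
  String.mk (presimplifiedA word.toList word.toList 0 [])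

-- ===== PORT B =====
-- 'ch == " " and (not out or out[-1] in "<>= ")' on the reversed-built suffix
def dropGuard (res : List Char) : Bool :=
  match res with
  | [] => true
  | c :: _ => c ∈ (['<', '>', '=', ' '] : List Char)

def presimplified_alt (word : String) : String :=
  String.mk (word.toList.foldr
    (fun ch res => if ch = ' ' ∧ dropGuard res then res else ch :: res) [])

-- ===== PRECONDITION & SPEC =====
def Spec_presimplified (word : String) (out : String) : Prop := out = presimplified_alt word
instance (word : String) (out : String) : Decidable (Spec_presimplified word out) := by unfold Spec_presimplified; infer_instance

-- ===== CLAIM (what is proved, stated in full; the proofs are below) =====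
def Claim_equal_presimplified : Prop := ∀ (word : String), Dom_presimplified word → Spec_presimplified word (presimplified word)

-- ===== LEMMAS AND PROOFS =====

-- reference function: keep each char unless it is a space whose successor position
-- is end-of-string or a symbol/space
def gRef : List Char → List Char
  | [] => []
  | ch :: rest => if ch = ' ' ∧ dropGuard rest then gRef rest else ch :: gRef rest

theorem dropGuard_gRef (l : List Char) : dropGuard (gRef l) = dropGuard l := by
  induction l with
  | nil => rfl
  | cons c t ih =>
    by_cases h : c = ' ' ∧ dropGuard t
    · rw [show gRef (c :: t) = gRef t from by rw [gRef, if_pos h], ih]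
      obtain ⟨rfl, ht⟩ := h
      rw [ht]; rfl
    · rw [show gRef (c :: t) = c :: gRef t from by rw [gRef, if_neg h]]
      rfl

theorem alt_eq_gRef (l : List Char) :
    l.foldr (fun ch res => if ch = ' ' ∧ dropGuard res then res else ch :: res) [] = gRef l := by
  induction l with
  | nil => rfl
  | cons c t ih =>
    simp only [List.foldr, ih, gRef, dropGuard_gRef]

theorem aux_eq_gRef (chs : List Char) : ∀ (pre newkey : List Char),
    newkey.length ≤ pre.length →
    presimplifiedA (pre ++ chs) chs (pre.length : Int) newkey = newkey ++ gRef chs := by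
  induction chs with
  | nil => intro pre newkey _; simp [presimplifiedA, gRef]
  | cons ch rest ih =>
    intro pre newkey hlen
    have hget : PySem.List.pyGet? (pre ++ ch :: rest) (pre.length : Int) = some ch :=
      PySem.List.pyGet?_append_length pre rest ch
    have hget1 : PySem.List.pyGet? (pre ++ ch :: rest) ((pre.length : Int) + 1) = rest[0]? := by
      have := PySem.List.pyGet?_append_right (pre := pre) (ys := ch :: rest) (k := 1)
      simpa using this
    have hrec : ∀ nk : List Char, nk.length ≤ pre.length + 1 →
        presimplifiedA (pre ++ ch :: rest) rest ((pre.length : Int) + 1) nk = nk ++ gRef rest := by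
      intro nk hnk
      have h2 : presimplifiedA ((pre ++ [ch]) ++ rest) rest (((pre ++ [ch]).length : Int)) nk
          = nk ++ gRef rest := ih (pre ++ [ch]) nk (by simpa using hnk)
      simpa [List.append_assoc, List.length_append, add_comm] using h2
    simp only [presimplifiedA, hget, hget1]
    by_cases hsp : ch = ' '
    · subst hsp
      by_cases hend : ((pre.length : Int) + 1 = ((pre ++ ' ' :: rest).length : Int))
      · -- rest = []
        have hr : rest = [] := by
          simp [List.length_append] at hend; omega
        subst hr
        simp only [if_pos hend]
        have : PySem.List.slice newkey (some 0) (some (pre.length : Int)) = newkey := by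
          rw [PySem.List.slice_zero_start, PySem.List.slice_to_natCast]
          exact List.take_of_length_le hlen
        simp [this, gRef, dropGuard]
      · have hne : ¬ ((pre.length : Int) + 1 = ((pre ++ ' ' :: rest).length : Nat)) := by
          exact_mod_cast hend
        simp only [if_neg hne]
        cases rest with
        | nil => exfalso; apply hend; simp [List.length_append]
        | cons r rs =>
          simp only [List.getElem?_cons_zero]
          by_cases hmem : r ∈ symblist1
          · have : ¬ r ∉ symblist1 := by simpa using hmem
            simp only [if_neg this]
            rw [hrec newkey (by omega)]
            have hg : dropGuard (r :: rs) = true := by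
              simp [symblist1] at hmem
              simp [dropGuard]; tauto
            simp [gRef, hg]
          · simp only [if_pos hmem]
            rw [hrec (newkey ++ [' ']) (by simp; omega)]
            have hg : dropGuard (r :: rs) = false := by
              simp [symblist1] at hmem
              simp [dropGuard]; tauto
            simp [gRef, hg]
    · have hne : ¬ (some ch = some (' ' : Char)) := by simpa using hsp
      simp only [if_neg hne]
      rw [hrec (newkey ++ [ch]) (by simp; omega)]
      have : ¬ (ch = ' ' ∧ dropGuard rest = true) := fun h => hsp h.1
      simp [gRef, this]

-- ===== VERDICT (by name: the statement is the Claim_ definition above) =====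
theorem presimplified_spec : Claim_equal_presimplified := by
  intro word _
  unfold Spec_presimplified presimplified presimplified_alt
  rw [alt_eq_gRef]
  have := aux_eq_gRef word.toList [] [] (le_refl 0)
  exact congrArg String.mk (by simpa using this)
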